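-- pv_equiv track=rewrite | github.com/simkin-bioinformatics/single_cell_labeling | alfred_example/custom2.py | yield_in_base
-- ===== SOURCE A (Python) =====
-- def yield_in_base(string, valuestring, separator='|'):
-- 	'''
-- 	designed to replace count_in_base by creating a generator function instead
-- 	of a list. Also eliminates the superfluous 'base' argument and the
-- 	requirement of a user supplied separator character as the last character of
-- 	the valuestring. Note: do not use '|' as one of the characters in the
-- 	valuestring unless you redefine the separator as something else.
-- 	'''
-- 	base=len(valuestring)
-- 	valuestring=valuestring+separator
-- 	full_length=len(string)
-- 	for count in range(base**len(string)):
-- 		yield string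
-- 		if string==valuestring[-2]*full_length:
-- 			break
-- 		position=len(string)-1
-- 		value=valuestring.index(string[position])
-- 		string=string[:position]+valuestring[value+1]+string[position+1:]
-- 		while value>=(base-1) and count<(base**len(string)):
-- 			string=string[:position]+valuestring[0]+string[position+1:]
-- 			position-=1
-- 			value=valuestring.index(string[position])
-- 			string=string[:position]+valuestring[value+1]+string[position+1:]
-- ===== SOURCE B (Python) =====
-- def yield_in_base(string, valuestring, separator='|'):
--     """Arithmetic reimplementation: convert the start string to an integer,
--     then count upward, rebuilding each string by repeated divmod."""
--     base = len(valuestring)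
--     n = len(string)
--     if n and not base:
--         return  # there are no length-n strings over an empty digit alphabet
--     start = 0
--     for ch in string:
--         start = start * base + valuestring.index(ch)
--     for v in range(start, base ** n):
--         digits = []
--         x = v
--         for _ in range(n):
--             digits.append(valuestring[x % base])
--             x //= base
--         yield ''.join(reversed(digits))
-- ===== Notes on version B (the rewrite author's own statement) =====
-- stated objective: simpler
-- what changed: A mutates the string like an odometer (index the last digit, splice in its successor, and run a while-loop propagating carries position by position); B converts the start string to an integer once, counts upward with range(), and rebuilds each yielded string by repeated divmod base conversion.
-- outside the precondition, e.g. on yield_in_base('0', '00', '|'): A returns ['0'], B returns ['0', '0']; on yield_in_base('1', '01', 'ab'): A returns ['1', '10'], B returns ['1']; on yield_in_base('0', '01', ''): A returns ['0'], B returns ['0', '1']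
import Mathlib
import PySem

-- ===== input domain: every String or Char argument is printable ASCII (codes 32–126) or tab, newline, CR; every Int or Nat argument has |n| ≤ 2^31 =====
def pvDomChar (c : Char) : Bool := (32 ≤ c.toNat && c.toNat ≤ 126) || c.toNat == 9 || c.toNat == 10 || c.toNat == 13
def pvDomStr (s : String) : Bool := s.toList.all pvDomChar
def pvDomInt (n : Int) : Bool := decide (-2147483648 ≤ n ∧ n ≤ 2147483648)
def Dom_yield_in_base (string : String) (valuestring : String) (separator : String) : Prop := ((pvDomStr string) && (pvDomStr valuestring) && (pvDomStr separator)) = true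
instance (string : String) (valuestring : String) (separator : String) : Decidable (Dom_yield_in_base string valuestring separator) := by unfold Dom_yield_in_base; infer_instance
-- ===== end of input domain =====

-- B replaces A's in-place odometer/carry string mutation by arithmetic base conversion (encode, count, decode); objective: simpler.


-- ===== PORT A =====
-- string[:pos] + c + string[pos+1:]
def pvSet (s : List Char) (pos : Int) (c : Char) : List Char :=
  PySem.List.slice s none (some pos) ++ c :: PySem.List.slice s (some (pos + 1)) none

-- the body of A's inner while loop, split into named pieces:
-- string = string[:position]+valuestring[0]+string[position+1:]
def yibW1 (vs2 : List Char) (s : List Char) (pos : Int) : List Char :=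
  pvSet s pos (PySem.List.pyGetD vs2 0 'X')

-- position -= 1; value = valuestring.index(string[position])
def yibWVal (vs2 : List Char) (s : List Char) (pos : Int) : Nat :=
  (PySem.List.index? vs2 (PySem.List.pyGetD (yibW1 vs2 s pos) (pos - 1) 'X')).getD 0

-- string = string[:position]+valuestring[value+1]+string[position+1:]
def yibW2 (vs2 : List Char) (s : List Char) (pos : Int) : List Char :=
  pvSet (yibW1 vs2 s pos) (pos - 1) (PySem.List.pyGetD vs2 ((yibWVal vs2 s pos : Int) + 1) 'X')

-- the `while value>=(base-1) and count<(base**len(string))` loop of A;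
-- fuel bounds the iterations (under Pre_ the Python loop runs at most len(string) times)
def yibWhile (vs2 : List Char) (base : Nat) (count : Nat) : Nat → List Char → Int → Int → List Char
  | 0, s, _, _ => s
  | fuel + 1, s, pos, val =>
    if val ≥ (base : Int) - 1 ∧ (count : Int) < (base : Int) ^ s.length then
      yibWhile vs2 base count fuel (yibW2 vs2 s pos) (pos - 1) (yibWVal vs2 s pos)
    else s

-- value = valuestring.index(string[position]) at position = len(string)-1
def yibSVal (vs2 s : List Char) : Nat :=
  (PySem.List.index? vs2 (PySem.List.pyGetD s ((s.length : Int) - 1) 'X')).getD 0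

-- string = string[:position]+valuestring[value+1]+string[position+1:]
def yibS1 (vs2 s : List Char) : List Char :=
  pvSet s ((s.length : Int) - 1) (PySem.List.pyGetD vs2 ((yibSVal vs2 s : Int) + 1) 'X')

-- the `for count in range(base**len(string))` loop of A (rem = iterations remaining)
def yibLoop (vs2 : List Char) (base : Nat) (full : Nat) : Nat → List Char → Nat → List (List Char)
  | 0, _, _ => []
  | rem + 1, s, count =>
    s :: (if s = List.replicate full (PySem.List.pyGetD vs2 (-2) 'X') then []
      else yibLoop vs2 base full rem
        (yibWhile vs2 base count (yibS1 vs2 s).length (yibS1 vs2 s) ((s.length : Int) - 1)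
          (yibSVal vs2 s))
        (count + 1))

def yield_in_base (string : String) (valuestring : String) (separator : String) : List String :=
  let base := valuestring.toList.length
  let vs2 := valuestring.toList ++ separator.toList
  let full := string.toList.length
  (yibLoop vs2 base full (base ^ full) string.toList 0).map String.ofList

-- ===== PORT B =====
-- the digits list of Source B: for _ in range(k): digits.append(valuestring[x % base]); x //= base
def altDigits (vsL : List Char) : Int → Nat → List Char
  | _, 0 => []
  | x, k + 1 =>
    PySem.List.pyGetD vsL (PySem.Int.mod x (vsL.length : Int)) 'X'
      :: altDigits vsL (PySem.Int.floordiv x (vsL.length : Int)) k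

def yield_in_base_alt (string : String) (valuestring : String) (separator : String) : List String :=
  let vsL := valuestring.toList
  let base : Int := (vsL.length : Int)
  let n := string.toList.length
  if n ≠ 0 ∧ vsL.length = 0 then []  -- no length-n strings over an empty digit alphabet
  else
    let start : Int := string.toList.foldl
      (fun a ch => a * base + (((PySem.List.index? vsL ch).getD 0 : Nat) : Int)) 0
    (PySem.List.pyRange start (base ^ n) 1).map
      (fun v => String.ofList (altDigits vsL v n).reverse)

-- ===== PRECONDITION & SPEC =====
-- Pre_ admits: any empty `string` (with valuestring+separator long enough for A's [-2] lookup),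
-- an empty valuestring with a nonempty string (A yields nothing), and the proper counting case
-- (one-character separator, nonempty duplicate-free valuestring, every character of `string`
-- drawn from valuestring).  It excludes inputs on which A raises (a character of `string`
-- outside valuestring+separator, or an increment indexing past valuestring+separator) and the
-- malformed corners where a value A returns is an accident of its implementation (an empty or
-- multi-character separator, so that valuestring[-2] and the carry target are not the top
-- digit, and duplicate characters in valuestring, where first-match .index stalls the odometer).
def Pre_yield_in_base (string : String) (valuestring : String) (separator : String) : Prop :=
  (string.toList = [] ∧ 2 ≤ valuestring.toList.length + separator.toList.length) ∨
  (valuestring.toList = [] ∧ string.toList ≠ []) ∨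
  (separator.toList.length = 1 ∧ 1 ≤ valuestring.toList.length ∧
    valuestring.toList.Nodup ∧
    string.toList.all (fun ch => valuestring.toList.contains ch) = true)
instance (string : String) (valuestring : String) (separator : String) : Decidable (Pre_yield_in_base string valuestring separator) := by unfold Pre_yield_in_base; infer_instance

def pvWitness_yield_in_base : String × String × String := ("ba", "abc", "|")

def Spec_yield_in_base (string : String) (valuestring : String) (separator : String) (out : List String) : Prop := out = yield_in_base_alt string valuestring separator
instance (string : String) (valuestring : String) (separator : String) (out : List String) : Decidable (Spec_yield_in_base string valuestring separator out) := by unfold Spec_yield_in_base; infer_instance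

-- ===== CLAIM (what is proved, stated in full; the proofs are below) =====
def Claim_equal_yield_in_base : Prop := ∀ (string : String) (valuestring : String) (separator : String), Dom_yield_in_base string valuestring separator → Pre_yield_in_base string valuestring separator → Spec_yield_in_base string valuestring separator (yield_in_base string valuestring separator)

-- ===== LEMMAS AND PROOFS =====

-- big-endian rendering of v in base vsL.length over the digit characters vsL
def yibRep (vsL : List Char) : Nat → Nat → List Char
  | 0, _ => []
  | n + 1, v => yibRep vsL n (v / vsL.length) ++ [vsL.getD (v % vsL.length) 'X']

-- Nat-level encoding of a string as an integer (B's `start`)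
def yibEnc (vsL : List Char) (s : List Char) : Nat :=
  s.foldl (fun a c => a * vsL.length + ((PySem.List.index? vsL c).getD 0)) 0


-- (yibRep vsL n v).length = n
theorem yibRep_length (vsL : List Char) (n v : Nat) : (yibRep vsL n v).length = n := by
  induction n generalizing v with
  | zero => rfl
  | succ n ih => simp [yibRep, ih]

-- Python's s[:k]+c+s[k+1:] at k = length of the prefix
theorem pvSet_concat (l t : List Char) (x c : Char) :
    pvSet (l ++ x :: t) (l.length : Int) c = l ++ c :: t := by
  have h1 : ((l.length : Int) + 1) = ((l.length + 1 : Nat) : Int) := by push_cast; ring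
  rw [pvSet, h1, PySem.List.slice_to_natCast, PySem.List.slice_from_natCast]
  rw [List.take_left, show l ++ x :: t = (l ++ [x]) ++ t by simp,
    show l.length + 1 = (l ++ [x]).length by simp, List.drop_left]

-- reading position k of l ++ x :: t, k = l.length
theorem pyGetD_concat (l t : List Char) (x d : Char) :
    PySem.List.pyGetD (l ++ x :: t) (l.length : Int) d = x := by
  rw [PySem.List.pyGetD_natCast]
  simp [List.getD]

-- first index, in vsL ++ t, of the j-th element of a duplicate-free list vsL is j
theorem index?_getElem (vs2 : List Char) (t : List Char) (hnd : vs2.Nodup) (j : Nat)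
    (hj : j < vs2.length) :
    ((PySem.List.index? (vs2 ++ t) vs2[j]).getD 0 : Nat) = j := by
  rw [PySem.List.index?_append_of_mem _ (List.getElem_mem hj)]
  have h : PySem.List.index? vs2 vs2[j] = some j := by
    rw [PySem.List.index?_eq_some_iff]
    refine ⟨vs2.take j, vs2.drop (j + 1), ?_, ?_, ?_⟩
    · conv_lhs => rw [← List.take_append_drop j vs2]
      rw [← List.getElem_cons_drop (by omega)]
    · simp [List.length_take]; omega
    · intro hmem
      rw [List.mem_take_iff_getElem] at hmem
      obtain ⟨i, hi, hieq⟩ := hmem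
      have : i = j := (List.Nodup.getElem_inj_iff hnd).mp hieq
      omega
  simp only [PySem.List.index?_eq_idxOf?] at h
  simp [h]

-- encoding bound
theorem yibEnc_lt (vsL s : List Char) (hs : ∀ c ∈ s, c ∈ vsL) :
    yibEnc vsL s < vsL.length ^ s.length := by
  induction s using List.reverseRecOn with
  | nil => simp [yibEnc]
  | append_singleton l c ih =>
    have hl : ∀ x ∈ l, x ∈ vsL := fun x hx => hs x (by simp [hx])
    have hc : c ∈ vsL := hs c (by simp)
    obtain ⟨k, hk⟩ := Option.isSome_iff_exists.mp ((PySem.List.index?_isSome_iff vsL c).mpr hc)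
    obtain ⟨hklt, -⟩ := PySem.List.getElem_of_index?_eq_some hk
    have henc : yibEnc vsL (l ++ [c]) = yibEnc vsL l * vsL.length + k := by
      unfold yibEnc
      rw [List.foldl_append]
      simp only [List.foldl_cons, List.foldl_nil, hk, Option.getD_some]
    have ihl := ih hl
    have hpow : vsL.length ^ (l.length + 1) = vsL.length ^ l.length * vsL.length := pow_succ _ _
    simp only [henc, List.length_append, List.length_cons, List.length_nil, Nat.zero_add, hpow]
    nlinarith [ihl, hklt]

-- decoding the encoding gives the string back
theorem yibRep_enc (vsL s : List Char) (hs : ∀ c ∈ s, c ∈ vsL) :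
    yibRep vsL s.length (yibEnc vsL s) = s := by
  induction s using List.reverseRecOn with
  | nil => rfl
  | append_singleton l c ih =>
    have hl : ∀ x ∈ l, x ∈ vsL := fun x hx => hs x (by simp [hx])
    have hc : c ∈ vsL := hs c (by simp)
    obtain ⟨k, hk⟩ := Option.isSome_iff_exists.mp ((PySem.List.index?_isSome_iff vsL c).mpr hc)
    obtain ⟨hklt, hkc, -⟩ := PySem.List.getElem_of_index?_eq_some hk
    have henc : yibEnc vsL (l ++ [c]) = yibEnc vsL l * vsL.length + k := by
      unfold yibEnc
      rw [List.foldl_append]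
      simp only [List.foldl_cons, List.foldl_nil, hk, Option.getD_some]
    have hb : 0 < vsL.length := by omega
    have hdiv : (yibEnc vsL l * vsL.length + k) / vsL.length = yibEnc vsL l := by
      rw [Nat.add_comm, Nat.add_mul_div_right _ _ hb, Nat.div_eq_of_lt hklt, Nat.zero_add]
    have hmod : (yibEnc vsL l * vsL.length + k) % vsL.length = k := by
      rw [Nat.mul_add_mod', Nat.mod_eq_of_lt hklt]

    simp only [henc, List.length_append, List.length_cons, List.length_nil, Nat.zero_add,
      yibRep, hdiv, hmod]
    rw [List.getD_eq_getElem _ _ hklt, hkc, ih hl]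

-- the all-top-digit string characterises the maximal value
theorem yibRep_max_iff (vsL : List Char) (hnd : vsL.Nodup) (h1 : 1 ≤ vsL.length) (n v : Nat)
    (hv : v < vsL.length ^ n) :
    yibRep vsL n v = List.replicate n (vsL.getD (vsL.length - 1) 'X') ↔ v = vsL.length ^ n - 1 := by
  induction n generalizing v with
  | zero =>
    rw [Nat.pow_zero] at hv
    simp only [yibRep, List.replicate_zero, Nat.pow_zero]
    exact ⟨fun _ => by omega, fun _ => trivial⟩
  | succ n ihn =>
    have hb : 0 < vsL.length := h1
    have hq : v / vsL.length < vsL.length ^ n := by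
      rw [Nat.div_lt_iff_lt_mul hb, ← pow_succ]; exact hv
    have hr : v % vsL.length < vsL.length := Nat.mod_lt _ hb
    have hP1 : 1 ≤ vsL.length ^ n := Nat.one_le_pow _ _ hb
    have e1 : (vsL.length ^ n - 1) * vsL.length = vsL.length ^ n * vsL.length - vsL.length := by
      rw [Nat.sub_mul, Nat.one_mul]
    have e2 : vsL.length ≤ vsL.length ^ n * vsL.length := Nat.le_mul_of_pos_left _ hP1
    have e3 : vsL.length ^ (n + 1) = vsL.length ^ n * vsL.length := pow_succ _ _
    have hdm := Nat.div_add_mod v vsL.length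
    have hiff : v = vsL.length ^ (n + 1) - 1 ↔
        (v / vsL.length = vsL.length ^ n - 1 ∧ v % vsL.length = vsL.length - 1) := by
      constructor
      · intro h
        have h2 : v = (vsL.length ^ n - 1) * vsL.length + (vsL.length - 1) := by omega
        constructor
        · rw [h2, Nat.add_comm, Nat.add_mul_div_right _ _ hb, Nat.div_eq_of_lt (by omega),
            Nat.zero_add]
        · rw [h2, Nat.mul_add_mod', Nat.mod_eq_of_lt (by omega)]
      · intro ⟨hd, hm⟩
        have e4 : vsL.length * (v / vsL.length) = (vsL.length ^ n - 1) * vsL.length := by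
          rw [hd, Nat.mul_comm]
        omega
    rw [yibRep, List.replicate_succ', hiff]
    constructor
    · intro h
      obtain ⟨hpre, hsuf⟩ := List.append_inj' h rfl
      rw [List.getD_eq_getElem _ _ hr,
        List.getD_eq_getElem _ _ (by omega : vsL.length - 1 < vsL.length)] at hsuf
      have hsuf' : vsL[v % vsL.length] = vsL[vsL.length - 1] := by injection hsuf
      exact ⟨(ihn _ hq).mp hpre, (List.Nodup.getElem_inj_iff hnd).mp hsuf'⟩
    · intro ⟨hd, hm⟩
      rw [hd, hm, (ihn _ (by omega)).mpr rfl]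

-- appending m zero digits multiplies by base^m
theorem yibRep_mul_pow (vsL : List Char) (h1 : 1 ≤ vsL.length) (m n u : Nat) (hmn : m ≤ n) :
    yibRep vsL n (u * vsL.length ^ m) = yibRep vsL (n - m) u ++ List.replicate m (vsL.getD 0 'X') := by
  induction m generalizing n with
  | zero => simp
  | succ m ih =>
    obtain ⟨n', rfl⟩ : ∃ n', n = n' + 1 := ⟨n - 1, by omega⟩
    have hb : 0 < vsL.length := h1
    have hdiv : u * vsL.length ^ (m + 1) / vsL.length = u * vsL.length ^ m := by
      rw [pow_succ, ← Nat.mul_assoc, Nat.mul_div_cancel _ hb]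
    have hmod : u * vsL.length ^ (m + 1) % vsL.length = 0 := by
      rw [pow_succ, ← Nat.mul_assoc, Nat.mul_mod_left]
    rw [yibRep, hdiv, hmod, ih n' (by omega)]
    rw [show n' + 1 - (m + 1) = n' - m from by omega]
    simp [List.replicate_succ']

-- valuestring[0] through the concatenated valuestring+separator
theorem pyGetD_vs2_zero (vsL : List Char) (sc : Char) (h1 : 1 ≤ vsL.length) :
    PySem.List.pyGetD (vsL ++ [sc]) 0 'X' = vsL.getD 0 'X' := by
  cases vsL with
  | nil => simp at h1
  | cons a t => simp [PySem.List.pyGetD_zero_cons]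

-- div/mod of q+1 when the last digit does not overflow
theorem yib_succ_div_mod (b q : Nat) (hb : 0 < b) (hr : q % b + 1 < b) :
    (q + 1) / b = q / b ∧ (q + 1) % b = q % b + 1 := by
  have hdm := Nat.div_add_mod q b
  constructor
  · rw [show q + 1 = (q % b + 1) + b * (q / b) from by omega,
      Nat.add_mul_div_left _ _ hb, Nat.div_eq_of_lt hr, Nat.zero_add]
  · rw [show q + 1 = (q % b + 1) + b * (q / b) from by omega,
      Nat.add_mul_mod_self_left, Nat.mod_eq_of_lt hr]

-- the carry identity: if the last digit is maximal, (q/b + 1)*b = q + 1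
theorem yib_carry_mul (b q : Nat) (hb : 0 < b) (hr : q % b = b - 1) :
    (q / b + 1) * b = q + 1 := by
  have hdm := Nat.div_add_mod q b
  rw [Nat.succ_mul]
  rw [Nat.mul_comm b (q / b)] at hdm
  omega

-- A's carry while-loop resolves a trailing run of carries into the digits of (q+1)*base^(n-k)
theorem yibWhile_carry (vsL : List Char) (sc : Char) (hnd : vsL.Nodup)
    (h1 : 1 ≤ vsL.length) (count : Nat) :
    ∀ k q z fuel, q + 1 < vsL.length ^ k → k ≤ fuel →
      (count : Int) < (vsL.length : Int) ^ (k + 1 + z) →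
      yibWhile (vsL ++ [sc]) vsL.length count fuel
          (yibRep vsL k q ++ sc :: List.replicate z (vsL.getD 0 'X')) (k : Int) ((vsL.length : Int) - 1)
        = yibRep vsL (k + 1 + z) ((q + 1) * vsL.length ^ (1 + z)) := by
  intro k
  induction k with
  | zero =>
    intro q z fuel hq _ _
    rw [Nat.pow_zero] at hq
    omega
  | succ k ih =>
    intro q z fuel hq hfuel hcount
    obtain ⟨f, rfl⟩ : ∃ f, fuel = f + 1 := ⟨fuel - 1, by omega⟩
    have hb : 0 < vsL.length := h1
    have hr : q % vsL.length < vsL.length := Nat.mod_lt _ hb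
    have hrepl : (yibRep vsL (k + 1) q).length = k + 1 := yibRep_length vsL (k + 1) q
    have hslen : (yibRep vsL (k + 1) q ++ sc :: List.replicate z (vsL.getD 0 'X')).length
        = k + 1 + 1 + z := by
      simp [yibRep_length]
      omega
    rw [yibWhile, if_pos ⟨le_refl _, by rw [hslen]; exact hcount⟩]
    have hcast : ((k + 1 : Nat) : Int) - 1 = ((k : Nat) : Int) := by push_cast; ring
    have hW1 : yibW1 (vsL ++ [sc])
        (yibRep vsL (k + 1) q ++ sc :: List.replicate z (vsL.getD 0 'X')) ((k + 1 : Nat) : Int)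
        = yibRep vsL k (q / vsL.length) ++ vsL.getD (q % vsL.length) 'X'
            :: vsL.getD 0 'X' :: List.replicate z (vsL.getD 0 'X') := by
      rw [yibW1, pyGetD_vs2_zero vsL sc h1,
        show ((k + 1 : Nat) : Int) = ((yibRep vsL (k + 1) q).length : Int) from by rw [hrepl],
        pvSet_concat]
      rw [show yibRep vsL (k + 1) q
          = yibRep vsL k (q / vsL.length) ++ [vsL.getD (q % vsL.length) 'X'] from rfl]
      simp
    have hkpre : ((k : Nat) : Int) = ((yibRep vsL k (q / vsL.length)).length : Int) := by
      rw [yibRep_length]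
    have hWVal : yibWVal (vsL ++ [sc])
        (yibRep vsL (k + 1) q ++ sc :: List.replicate z (vsL.getD 0 'X')) ((k + 1 : Nat) : Int)
        = q % vsL.length := by
      rw [yibWVal, hW1, hcast, hkpre, pyGetD_concat]
      rw [List.getD_eq_getElem _ _ hr]
      exact index?_getElem vsL [sc] hnd _ hr
    have hnext : q % vsL.length + 1 < (vsL ++ [sc]).length := by simp; omega
    have hW2 : yibW2 (vsL ++ [sc])
        (yibRep vsL (k + 1) q ++ sc :: List.replicate z (vsL.getD 0 'X')) ((k + 1 : Nat) : Int)
        = yibRep vsL k (q / vsL.length) ++ (vsL ++ [sc])[q % vsL.length + 1]'hnext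
            :: vsL.getD 0 'X' :: List.replicate z (vsL.getD 0 'X') := by
      rw [yibW2, hWVal, hW1, hcast, hkpre, pvSet_concat]
      congr 2
      rw [show ((q % vsL.length : Nat) : Int) + 1 = ((q % vsL.length + 1 : Nat) : Int) from by
        push_cast; ring]
      rw [PySem.List.pyGetD_natCast, List.getD_eq_getElem _ _ hnext]
    rw [hW2, hWVal, hcast]
    by_cases hcase : q % vsL.length + 1 < vsL.length
    · -- no further carry: the while condition fails and the result is the incremented string
      have hgl : (vsL ++ [sc])[q % vsL.length + 1]'hnext = vsL[q % vsL.length + 1]'hcase :=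
        List.getElem_append_left hcase
      have hstop : yibWhile (vsL ++ [sc]) vsL.length count f
          (yibRep vsL k (q / vsL.length) ++ (vsL ++ [sc])[q % vsL.length + 1]'hnext
            :: vsL.getD 0 'X' :: List.replicate z (vsL.getD 0 'X')) ((k : Nat) : Int)
          ((q % vsL.length : Nat) : Int)
          = yibRep vsL k (q / vsL.length) ++ (vsL ++ [sc])[q % vsL.length + 1]'hnext
            :: vsL.getD 0 'X' :: List.replicate z (vsL.getD 0 'X') := by
        cases f with
        | zero => rw [yibWhile]
        | succ f' =>
          rw [yibWhile, if_neg]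
          rintro ⟨hge, -⟩
          omega
      rw [hstop, hgl]
      obtain ⟨hdiv, hmod⟩ := yib_succ_div_mod vsL.length q hb hcase
      rw [show k + 1 + 1 + z = (k + 1) + (1 + z) from by omega,
        yibRep_mul_pow vsL h1 (1 + z) ((k + 1) + (1 + z)) (q + 1) (by omega),
        show (k + 1) + (1 + z) - (1 + z) = k + 1 from by omega]
      rw [show yibRep vsL (k + 1) (q + 1)
          = yibRep vsL k ((q + 1) / vsL.length) ++ [vsL.getD ((q + 1) % vsL.length) 'X'] from rfl,
        hdiv, hmod]
      rw [List.getD_eq_getElem _ _ hcase, show 1 + z = z + 1 from by omega, List.replicate_succ]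
      simp
    · -- the carry propagates: apply the induction hypothesis one position to the left
      have hrq : q % vsL.length = vsL.length - 1 := by omega
      have heq : q % vsL.length + 1 = vsL.length := by omega
      have hsc : (vsL ++ [sc])[q % vsL.length + 1]'hnext = sc := by
        rw [List.getElem_append_right (by omega)]
        simp [heq]
      have hmul := yib_carry_mul vsL.length q hb hrq
      have hq' : q / vsL.length + 1 < vsL.length ^ k := by
        have hpow : vsL.length ^ (k + 1) = vsL.length ^ k * vsL.length := pow_succ _ _
        have hlt : (q / vsL.length + 1) * vsL.length < vsL.length ^ k * vsL.length := by
          rw [hmul, ← hpow]; exact hq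
        exact Nat.lt_of_mul_lt_mul_right hlt
      have ihres := ih (q / vsL.length) (z + 1) f hq' (by omega)
        (by rw [show k + 1 + (z + 1) = k + 1 + 1 + z from by omega]; exact hcount)
      rw [hsc, show vsL.getD 0 'X' :: List.replicate z (vsL.getD 0 'X')
          = List.replicate (z + 1) (vsL.getD 0 'X') from List.replicate_succ.symm,
        show ((q % vsL.length : Nat) : Int) = (vsL.length : Int) - 1 from by omega,
        ihres,
        show k + 1 + (z + 1) = k + 1 + 1 + z from by omega,
        show (q / vsL.length + 1) * vsL.length ^ (1 + (z + 1))
          = ((q / vsL.length + 1) * vsL.length) * vsL.length ^ (1 + z) from by ring,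
        hmul]

-- one iteration of A's outer loop increments the represented value
theorem yib_step (vsL : List Char) (sc : Char) (hnd : vsL.Nodup)
    (h1 : 1 ≤ vsL.length) (n v count : Nat) (hn : 1 ≤ n) (hv : v + 1 < vsL.length ^ n)
    (hc : count < vsL.length ^ n) :
    yibWhile (vsL ++ [sc]) vsL.length count (yibS1 (vsL ++ [sc]) (yibRep vsL n v)).length
        (yibS1 (vsL ++ [sc]) (yibRep vsL n v)) (((yibRep vsL n v).length : Int) - 1)
        (yibSVal (vsL ++ [sc]) (yibRep vsL n v))
      = yibRep vsL n (v + 1) := by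
  obtain ⟨m, rfl⟩ : ∃ m, n = m + 1 := ⟨n - 1, by omega⟩
  have hb : 0 < vsL.length := h1
  have hr : v % vsL.length < vsL.length := Nat.mod_lt _ hb
  have hrepl : (yibRep vsL (m + 1) v).length = m + 1 := yibRep_length vsL (m + 1) v
  have hpre : yibRep vsL (m + 1) v
      = yibRep vsL m (v / vsL.length) ++ [vsL.getD (v % vsL.length) 'X'] := rfl
  have hposcast : (((yibRep vsL (m + 1) v).length : Int)) - 1 = ((m : Nat) : Int) := by
    rw [hrepl]; push_cast; ring
  have hmpre : ((m : Nat) : Int) = ((yibRep vsL m (v / vsL.length)).length : Int) := by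
    rw [yibRep_length]
  have hnext : v % vsL.length + 1 < (vsL ++ [sc]).length := by simp; omega
  have hSVal : yibSVal (vsL ++ [sc]) (yibRep vsL (m + 1) v) = v % vsL.length := by
    rw [yibSVal, hposcast, hmpre]
    conv_lhs => rw [hpre]
    rw [show yibRep vsL m (v / vsL.length) ++ [vsL.getD (v % vsL.length) 'X']
        = yibRep vsL m (v / vsL.length) ++ vsL.getD (v % vsL.length) 'X' :: [] from rfl,
      pyGetD_concat]
    rw [List.getD_eq_getElem _ _ hr]
    exact index?_getElem vsL [sc] hnd _ hr
  have hS1 : yibS1 (vsL ++ [sc]) (yibRep vsL (m + 1) v)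
      = yibRep vsL m (v / vsL.length) ++ [(vsL ++ [sc])[v % vsL.length + 1]'hnext] := by
    rw [yibS1, hSVal, hposcast, hmpre]
    conv_lhs => rw [hpre]
    rw [show yibRep vsL m (v / vsL.length) ++ [vsL.getD (v % vsL.length) 'X']
        = yibRep vsL m (v / vsL.length) ++ vsL.getD (v % vsL.length) 'X' :: [] from rfl,
      pvSet_concat]
    congr 2
    rw [show ((v % vsL.length : Nat) : Int) + 1 = ((v % vsL.length + 1 : Nat) : Int) from by
      push_cast; ring]
    rw [PySem.List.pyGetD_natCast, List.getD_eq_getElem _ _ hnext]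
  rw [hS1, hSVal, hposcast,
    show (yibRep vsL m (v / vsL.length) ++ [(vsL ++ [sc])[v % vsL.length + 1]'hnext]).length
      = m + 1 from by simp [yibRep_length]]
  by_cases hcase : v % vsL.length + 1 < vsL.length
  · have hgl : (vsL ++ [sc])[v % vsL.length + 1]'hnext = vsL[v % vsL.length + 1]'hcase :=
      List.getElem_append_left hcase
    rw [yibWhile, if_neg (by rintro ⟨hge, -⟩; omega)]
    obtain ⟨hdiv, hmod⟩ := yib_succ_div_mod vsL.length v hb hcase
    rw [show yibRep vsL (m + 1) (v + 1)
        = yibRep vsL m ((v + 1) / vsL.length) ++ [vsL.getD ((v + 1) % vsL.length) 'X'] from rfl,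
      hdiv, hmod, hgl, List.getD_eq_getElem _ _ hcase]
  · have hrq : v % vsL.length = vsL.length - 1 := by omega
    have heq : v % vsL.length + 1 = vsL.length := by omega
    have hsc : (vsL ++ [sc])[v % vsL.length + 1]'hnext = sc := by
      rw [List.getElem_append_right (by omega)]
      simp [heq]
    have hmul := yib_carry_mul vsL.length v hb hrq
    have hq' : v / vsL.length + 1 < vsL.length ^ m := by
      have hpow : vsL.length ^ (m + 1) = vsL.length ^ m * vsL.length := pow_succ _ _
      have hlt : (v / vsL.length + 1) * vsL.length < vsL.length ^ m * vsL.length := by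
        rw [hmul, ← hpow]; exact hv
      exact Nat.lt_of_mul_lt_mul_right hlt
    have ihres := yibWhile_carry vsL sc hnd h1 count m (v / vsL.length) 0 (m + 1) hq'
      (by omega) (by exact_mod_cast hc)
    simp only [List.replicate_zero] at ihres
    rw [hsc, show ((v % vsL.length : Nat) : Int) = (vsL.length : Int) - 1 from by omega, ihres,
      show (1 : Nat) + 0 = 1 from rfl, pow_one, hmul]

-- A's outer loop, from value v, yields the representations of v, v+1, …, base^n - 1
theorem yibLoop_eq (vsL : List Char) (sc : Char) (hnd : vsL.Nodup)
    (h1 : 1 ≤ vsL.length) (n : Nat) :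
    ∀ rem v count, count ≤ v → v < vsL.length ^ n → rem = vsL.length ^ n - count →
      yibLoop (vsL ++ [sc]) vsL.length n rem (yibRep vsL n v) count
        = (List.range (vsL.length ^ n - v)).map (fun k => yibRep vsL n (v + k)) := by
  intro rem
  induction rem with
  | zero =>
    intro v count hcv hv hrem
    exfalso
    omega
  | succ rem ih =>
    intro v count hcv hv hrem
    have hb : 0 < vsL.length := h1
    have hvs2 : (vsL ++ [sc]).length = vsL.length + 1 := by simp
    have hm2 : PySem.List.pyGetD (vsL ++ [sc]) (-2) 'X' = vsL.getD (vsL.length - 1) 'X' := by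
      rw [PySem.List.pyGetD_neg_ofNat _ 2 _ (by omega) (by simp; omega)]
      have hidx : vsL.length + 1 - 2 = vsL.length - 1 := by omega
      simp only [hvs2, hidx]
      rw [List.getElem_append_left (by omega), List.getD_eq_getElem _ _ (by omega)]
    by_cases hmaxcase : v = vsL.length ^ n - 1
    · have hbreak : yibRep vsL n v = List.replicate n (vsL.getD (vsL.length - 1) 'X') :=
        (yibRep_max_iff vsL hnd h1 n v hv).mpr hmaxcase
      rw [yibLoop, hm2, if_pos hbreak]
      rw [show vsL.length ^ n - v = 1 from by omega]
      simp
    · have hn1 : 1 ≤ n := by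
        rcases Nat.eq_zero_or_pos n with h0 | h
        · exfalso
          rw [h0, Nat.pow_zero] at hv hmaxcase
          omega
        · exact h
      have hvnotmax : yibRep vsL n v ≠ List.replicate n (vsL.getD (vsL.length - 1) 'X') :=
        fun h => hmaxcase ((yibRep_max_iff vsL hnd h1 n v hv).mp h)
      rw [yibLoop, hm2, if_neg hvnotmax]
      rw [yib_step vsL sc hnd h1 n v count hn1 (by omega) (by omega)]
      rw [ih (v + 1) (count + 1) (by omega) (by omega) (by omega)]
      rw [show vsL.length ^ n - v = (vsL.length ^ n - (v + 1)) + 1 from by omega,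
        List.range_succ_eq_map]
      simp only [List.map_cons, Nat.add_zero, List.map_map]
      congr 1
      exact List.map_congr_left fun k _ => by congr 1; omega

-- B's digit loop, reversed, is the big-endian representation
theorem altDigits_rep (vsL : List Char) (k v : Nat) :
    (altDigits vsL (v : Int) k).reverse = yibRep vsL k v := by
  induction k generalizing v with
  | zero => rfl
  | succ k ih =>
    rw [altDigits, PySem.Int.mod_natCast, PySem.Int.floordiv_natCast, PySem.List.pyGetD_natCast]
    simp only [List.reverse_cons, ih, yibRep]

-- B's integer fold is the Nat-level encoding
theorem alt_start (vsL s : List Char) :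
    s.foldl (fun a ch => a * (vsL.length : Int) + (((PySem.List.index? vsL ch).getD 0 : Nat) : Int)) 0
      = (yibEnc vsL s : Int) := by
  have key : ∀ (a : Nat), s.foldl
      (fun a ch => a * (vsL.length : Int) + (((PySem.List.index? vsL ch).getD 0 : Nat) : Int)) (a : Int)
      = (s.foldl (fun a c => a * vsL.length + ((PySem.List.index? vsL c).getD 0)) a : Nat) := by
    induction s with
    | nil => intro a; rfl
    | cons c t ih =>
      intro a
      simp only [List.foldl_cons]
      rw [show (a : Int) * (vsL.length : Int) + (((PySem.List.index? vsL c).getD 0 : Nat) : Int)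
          = ((a * vsL.length + (PySem.List.index? vsL c).getD 0 : Nat) : Int) from by push_cast; ring]
      exact ih _
  simpa [yibEnc] using key 0

-- ===== VERDICT (by name: the statement is the Claim_ definition above) =====
theorem yield_in_base_spec : Claim_equal_yield_in_base := by
  intro string valuestring separator _hdom hpre
  rcases hpre with ⟨hempty, hlen2⟩ | ⟨hvs0, hs0⟩ | ⟨hsep, hvl, hnd, hmemb⟩
  · -- empty string: both sides yield exactly the input once
    unfold Spec_yield_in_base
    simp only [yield_in_base, yield_in_base_alt, hempty]
    rw [if_neg (by rintro ⟨h0, -⟩; simp at h0)]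
    rw [show ([] : List Char).length = 0 from rfl, Nat.pow_zero]
    rw [yibLoop]
    simp only [List.replicate_zero, if_true]
    rw [List.foldl_nil, show ((valuestring.toList.length : Int)) ^ 0 = ((1 : Nat) : Int) from by
      rw [pow_zero]; rfl]
    rw [PySem.List.pyRange_one]
    simp [altDigits]
  · -- empty valuestring, nonempty string: both sides produce nothing
    unfold Spec_yield_in_base
    simp only [yield_in_base, yield_in_base_alt, hvs0]
    rw [if_pos ⟨by simpa using hs0, rfl⟩]
    have hnz : string.toList.length ≠ 0 := by simpa using hs0
    have hzp : (0 : Nat) ^ string.toList.length = 0 := Nat.zero_pow (by omega)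
    rw [show ([] : List Char).length = 0 from rfl, hzp, yibLoop]
    rfl
  have hmem : ∀ c ∈ string.toList, c ∈ valuestring.toList := by
    simp [List.all_eq_true] at hmemb
    exact hmemb
  obtain ⟨sc, hsc⟩ := List.length_eq_one_iff.mp hsep
  unfold Spec_yield_in_base
  have henc_lt := yibEnc_lt valuestring.toList string.toList hmem
  have hrepenc := yibRep_enc valuestring.toList string.toList hmem
  have hA := yibLoop_eq valuestring.toList sc hnd hvl string.toList.length
    (valuestring.toList.length ^ string.toList.length) (yibEnc valuestring.toList string.toList) 0
    (by omega) henc_lt (by omega)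
  rw [hrepenc] at hA
  simp only [yield_in_base, yield_in_base_alt, hsc]
  rw [if_neg (by rintro ⟨-, h0⟩; omega)]
  rw [hA, alt_start valuestring.toList string.toList]
  rw [show ((valuestring.toList.length : Int)) ^ string.toList.length
      = ((valuestring.toList.length ^ string.toList.length : Nat) : Int) from by push_cast; ring]
  rw [PySem.List.pyRange_one]
  rw [show ((valuestring.toList.length ^ string.toList.length : Nat) : Int)
      - ((yibEnc valuestring.toList string.toList : Nat) : Int)
      = (((valuestring.toList.length ^ string.toList.length
          - yibEnc valuestring.toList string.toList : Nat)) : Int) from by omega]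
  simp only [Int.toNat_natCast, List.map_map]
  apply List.map_congr_left
  intro k hk
  simp only [Function.comp_apply]
  rw [show (yibEnc valuestring.toList string.toList : Int) + (k : Int)
      = ((yibEnc valuestring.toList string.toList + k : Nat) : Int) from by push_cast; ring]
  rw [altDigits_rep]
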